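-- pv_equiv track=rewrite | github.com/zq-zhan/Algorithm_updating | 202412二分算法/20241228二分答案/2-3找出出现至少三次的最长特殊子字符串2.py | check
-- ===== SOURCE A (Python) =====
-- from collections import defaultdict,Counter
--
-- def check(s, mid):
-- 	mid_dic = defaultdict(int)
-- 	n = len(s)
-- 	left = 0
-- 	while left < n:
-- 		right = left + 1
-- 		while right < n and s[right] == s[right - 1]:
-- 			right += 1
-- 		if right - left >= mid:
-- 			mid_dic[s[left:left + mid]] += max(0, right - left - mid + 1)
-- 		# mid_dic[s[left]] += max(0, right - left - mid + 1)  # 优化,字符串小于mid的话，right - left - mid + 1 为负数，不影响对符合特殊子串的计数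
-- 			if max(mid_dic.values()) >= 3:
-- 				return True
-- 		left = right
-- 	return False
-- ===== SOURCE B (Python) =====
-- def check(s, mid):
--     # count occurrences of each uniform length-mid window by sliding over every start position
--     counts = {}
--     n = len(s)
--     for i in range(n - mid + 1):
--         t = s[i:i + mid]
--         if t and all(ch == t[0] for ch in t):
--             counts[t] = counts.get(t, 0) + 1
--     return any(v >= 3 for v in counts.values())
-- ===== Notes on version B (the rewrite author's own statement) =====
-- stated objective: alternative
-- what changed: A run-length-decomposes the string and adds an arithmetic count max(0,run-mid+1) per run with an early exit; B never detects runs at all: it slides over every start position, tests the length-mid window for uniformity, counts each occurrence once in a dict, and thresholds at the end.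
-- outside the precondition, e.g. on check('aaa', 0): A returns True, B returns False; on check('ab', -1): A returns True, B returns False
import Mathlib
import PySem

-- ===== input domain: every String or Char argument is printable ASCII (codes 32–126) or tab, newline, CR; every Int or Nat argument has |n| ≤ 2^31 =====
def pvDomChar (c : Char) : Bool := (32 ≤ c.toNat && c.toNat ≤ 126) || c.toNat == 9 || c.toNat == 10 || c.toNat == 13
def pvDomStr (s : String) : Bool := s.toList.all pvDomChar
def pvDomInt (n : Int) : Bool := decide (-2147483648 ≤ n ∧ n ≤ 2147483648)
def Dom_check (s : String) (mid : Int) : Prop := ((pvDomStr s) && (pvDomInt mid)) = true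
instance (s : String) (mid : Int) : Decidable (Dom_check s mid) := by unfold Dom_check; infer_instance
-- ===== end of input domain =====

-- B drops A's run-length decomposition entirely: it slides over every window start position,
-- tests the length-mid window for uniformity and counts occurrences one by one; return value only.

-- ===== PORT A =====
-- inner while: right += 1 while right < n and s[right] == s[right-1]
def runEndA (cs : List Char) (n : Nat) (right : Nat) : Nat :=
  if right < n ∧ cs.getD right ' ' = cs.getD (right - 1) ' ' then runEndA cs n (right + 1) else right
termination_by n - right
decreasing_by omega

theorem le_runEndA (cs : List Char) (n right : Nat) : right ≤ runEndA cs n right := by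
  unfold runEndA
  split
  · exact le_trans (Nat.le_succ right) (le_runEndA cs n (right + 1))
  · exact le_refl _
termination_by n - right
decreasing_by omega

-- max(mid_dic.values()) >= 3 (dict never empty when evaluated)
def maxGe3 (d : PySem.Dict (List Char) Int) : Bool :=
  match PySem.List.max? d.values (fun v => v) with
  | some m => decide (3 ≤ m)
  | none => false

-- outer while loop of A
def loopA (cs : List Char) (mid : Int) (n : Nat) (left : Nat) (dic : PySem.Dict (List Char) Int) : Bool :=
  if _h : left < n then
    let right := runEndA cs n (left + 1)
    if mid ≤ (right : Int) - (left : Int) then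
      let key := PySem.List.slice cs (some (left : Int)) (some ((left : Int) + mid))
      let dic' := dic.insert key (dic.getD key 0 + max 0 ((right : Int) - (left : Int) - mid + 1))
      if maxGe3 dic' then true else loopA cs mid n right dic'
    else loopA cs mid n right dic
  else false
termination_by n - left
decreasing_by all_goals (have := le_runEndA cs n (left + 1); omega)

def check (s : String) (mid : Int) : Bool :=
  loopA s.toList mid s.toList.length 0 PySem.Dict.empty

-- ===== PORT B =====
-- loop body: t = s[i:i+mid]; if t and all(ch == t[0] for ch in t): counts[t] = counts.get(t, 0) + 1
def posStep (cs : List Char) (mid : Int) (d : PySem.Dict (List Char) Int) (i : Int) :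
    PySem.Dict (List Char) Int :=
  if PySem.List.slice cs (some i) (some (i + mid)) ≠ [] ∧
      ∀ ch ∈ PySem.List.slice cs (some i) (some (i + mid)),
        ch = (PySem.List.slice cs (some i) (some (i + mid))).headD ' '
  then d.insert (PySem.List.slice cs (some i) (some (i + mid)))
    (d.getD (PySem.List.slice cs (some i) (some (i + mid))) 0 + 1)
  else d

def check_alt (s : String) (mid : Int) : Bool :=
  let cs := s.toList
  let counts := (PySem.List.pyRange 0 ((cs.length : Int) - mid + 1) 1).foldl (posStep cs mid) PySem.Dict.empty
  counts.values.any (fun v => decide (3 ≤ v))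

-- ===== PRECONDITION & SPEC =====
-- Pre_ excludes mid ≤ 0, a degenerate candidate length the binary search never asks about: there A's
-- slice key s[left:left+mid] collapses to the empty string and merges all runs into one accidental count,
-- while B finds no nonempty uniform window; both answers are defensible on this unspecified corner.
def Pre_check (s : String) (mid : Int) : Prop := 1 ≤ mid
instance (s : String) (mid : Int) : Decidable (Pre_check s mid) := by unfold Pre_check; infer_instance
def pvWitness_check : String × Int := ("aab", 1)
def Spec_check (s : String) (mid : Int) (out : Bool) : Prop := out = check_alt s mid
instance (s : String) (mid : Int) (out : Bool) : Decidable (Spec_check s mid out) := by unfold Spec_check; infer_instance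

-- ===== CLAIM (what is proved, stated in full; the proofs are below) =====
def Claim_equal_check : Prop := ∀ (s : String) (mid : Int), Dom_check s mid → Pre_check s mid → Spec_check s mid (check s mid)

-- ===== LEMMAS AND PROOFS =====

theorem runEndA_le_n (cs : List Char) (n right : Nat) (h : right ≤ n) : runEndA cs n right ≤ n := by
  unfold runEndA
  split
  · rename_i hc
    exact runEndA_le_n cs n (right + 1) (by omega)
  · exact h
termination_by n - right
decreasing_by omega

-- every index strictly inside the scanned run equals its predecessor
theorem runEndA_chars (cs : List Char) (n : Nat) :
    ∀ (k r j : Nat), n - r ≤ k → r ≤ j → j < runEndA cs n r →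
      cs.getD j ' ' = cs.getD (j - 1) ' ' := by
  intro k
  induction k with
  | zero =>
    intro r j hk hrj hj
    rw [runEndA] at hj
    rw [if_neg (by omega : ¬ (r < n ∧ cs.getD r ' ' = cs.getD (r - 1) ' '))] at hj
    omega
  | succ k ih =>
    intro r j hk hrj hj
    rw [runEndA] at hj
    by_cases hc : r < n ∧ cs.getD r ' ' = cs.getD (r - 1) ' '
    · rw [if_pos hc] at hj
      rcases Nat.eq_or_lt_of_le hrj with rfl | hlt
      · exact hc.2
      · exact ih (r + 1) j (by omega) (by omega) hj
    · rw [if_neg hc] at hj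
      omega

-- at the returned index the while condition is false
theorem runEndA_stop (cs : List Char) (n : Nat) :
    ∀ (k r : Nat), n - r ≤ k →
      ¬ (runEndA cs n r < n ∧ cs.getD (runEndA cs n r) ' ' = cs.getD (runEndA cs n r - 1) ' ') := by
  intro k
  induction k with
  | zero =>
    intro r hk
    rw [runEndA, if_neg (by omega : ¬ (r < n ∧ cs.getD r ' ' = cs.getD (r - 1) ' '))]
    omega
  | succ k ih =>
    intro r hk
    rw [runEndA]
    by_cases hc : r < n ∧ cs.getD r ' ' = cs.getD (r - 1) ' '
    · rw [if_pos hc]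
      exact ih (r + 1) (by omega)
    · rw [if_neg hc]
      exact hc

-- a chain of pairwise equalities makes the run constant
theorem run_const (cs : List Char) (left b : Nat)
    (h : ∀ j, left < j → j < b → cs.getD j ' ' = cs.getD (j - 1) ' ') :
    ∀ j, left ≤ j → j < b → cs.getD j ' ' = cs.getD left ' ' := by
  intro j
  induction j using Nat.strong_induction_on with
  | _ j ih =>
    intro hlj hjb
    rcases Nat.eq_or_lt_of_le hlj with rfl | hlt
    · rfl
    · rw [h j hlt hjb]
      exact ih (j - 1) (by omega) (by omega) (by omega)

theorem maxGe3_eq_any (d : PySem.Dict (List Char) Int) :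
    maxGe3 d = d.values.any (fun v => decide (3 ≤ v)) := by
  unfold maxGe3
  rcases h : PySem.List.max? d.values (fun v => v) with _ | m
  · rw [(PySem.List.max?_eq_none_iff _ _).mp h]
    rfl
  · by_cases h3 : (3 : Int) ≤ m
    · simp only [h3, decide_true]
      exact (List.any_eq_true.mpr ⟨m, PySem.List.max?_mem h, by simpa using h3⟩).symm
    · simp only [h3, decide_false]
      symm
      rw [List.any_eq_false]
      intro v hv
      simp only [decide_eq_true_eq]
      exact fun h3v => h3 (le_trans h3v (PySem.List.max?_isMax h v hv))

theorem getD_posStep_le (cs : List Char) (mid : Int) (d : PySem.Dict (List Char) Int)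
    (i : Int) (k : List Char) : d.getD k 0 ≤ (posStep cs mid d i).getD k 0 := by
  unfold posStep
  split
  · rw [PySem.Dict.getD_insert]
    split
    · rename_i hk
      subst hk
      omega
    · exact le_refl _
  · exact le_refl _

theorem le_getD_foldl_pos (cs : List Char) (mid : Int) :
    ∀ (l : List Int) (d : PySem.Dict (List Char) Int) (k : List Char),
      d.getD k 0 ≤ (l.foldl (posStep cs mid) d).getD k 0 := by
  intro l
  induction l with
  | nil => intro d k; exact le_refl _
  | cons r t ih =>
    intro d k
    exact le_trans (getD_posStep_le cs mid d r k) (ih (posStep cs mid d r) k)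

theorem nodup_posStep (cs : List Char) (mid : Int) (d : PySem.Dict (List Char) Int)
    (i : Int) (h : d.keys.Nodup) : (posStep cs mid d i).keys.Nodup := by
  unfold posStep
  split
  · exact PySem.Dict.nodup_keys_insert _ _ _ h
  · exact h

theorem nodup_foldl_pos (cs : List Char) (mid : Int) :
    ∀ (l : List Int) (d : PySem.Dict (List Char) Int), d.keys.Nodup →
      (l.foldl (posStep cs mid) d).keys.Nodup := by
  intro l
  induction l with
  | nil => intro d h; exact h
  | cons r t ih => intro d h; exact ih _ (nodup_posStep cs mid d r h)

theorem any_ge3_iff_exists_getD (d : PySem.Dict (List Char) Int) (hnd : d.keys.Nodup) :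
    d.values.any (fun v => decide (3 ≤ v)) = true ↔ ∃ k, (3 : Int) ≤ d.getD k 0 := by
  rw [PySem.Dict.values_eq_map_keys d hnd 0]
  constructor
  · intro h
    obtain ⟨v, hv, h3⟩ := List.any_eq_true.mp h
    obtain ⟨k, _, rfl⟩ := List.mem_map.mp hv
    exact ⟨k, by simpa using h3⟩
  · rintro ⟨k, h3⟩
    have hmem : k ∈ d.keys := by
      by_contra hnk
      rw [PySem.Dict.getD_of_not_contains] at h3
      · omega
      · rw [PySem.Dict.contains_eq_decide_mem_keys]
        simpa using hnk
    exact List.any_eq_true.mpr ⟨d.getD k 0, List.mem_map.mpr ⟨k, hmem, rfl⟩, by simpa using h3⟩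

theorem any_ge3_foldl_pos (cs : List Char) (mid : Int) (l : List Int)
    (d : PySem.Dict (List Char) Int) (hnd : d.keys.Nodup)
    (h : d.values.any (fun v => decide (3 ≤ v)) = true) :
    (l.foldl (posStep cs mid) d).values.any (fun v => decide (3 ≤ v)) = true := by
  obtain ⟨k, h3⟩ := (any_ge3_iff_exists_getD d hnd).mp h
  exact (any_ge3_iff_exists_getD _ (nodup_foldl_pos cs mid l d hnd)).mpr
    ⟨k, le_trans h3 (le_getD_foldl_pos cs mid l d k)⟩

-- a fully uniform window is the replicate
theorem window_eq_replicate (cs : List Char) (m j : Nat) (c0 : Char)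
    (hjn : j + m ≤ cs.length) (hconst : ∀ x, j ≤ x → x < j + m → cs.getD x ' ' = c0) :
    (cs.drop j).take m = List.replicate m c0 := by
  apply List.ext_getElem
  · simp
    omega
  · intro k h1 h2
    have hk : k < m := by simpa using h2
    have hx : j + k < cs.length := by omega
    simp only [List.getElem_take, List.getElem_drop, List.getElem_replicate]
    have := hconst (j + k) (by omega) (by omega)
    rw [List.getD_eq_getElem cs ' ' hx] at this
    exact this

-- the window of the B loop, in drop/take form
theorem slice_window (cs : List Char) (m j : Nat) :
    PySem.List.slice cs (some (j : Int)) (some ((j : Int) + (m : Int))) = (cs.drop j).take m :=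
  PySem.List.slice_natCast_add cs j m

-- a window that crosses the run boundary fails the uniformity test
theorem window_not_uniform (cs : List Char) (m j right : Nat) (c0 : Char)
    (hm : 1 ≤ m) (hjr : j < right) (hcross : right < j + m) (hjn : j + m ≤ cs.length)
    (hconst : ∀ x, j ≤ x → x < right → cs.getD x ' ' = c0)
    (hne : cs.getD right ' ' ≠ cs.getD (right - 1) ' ') :
    ¬ ((cs.drop j).take m ≠ [] ∧ ∀ ch ∈ (cs.drop j).take m, ch = ((cs.drop j).take m).headD ' ') := by
  rintro ⟨hnil, hall⟩
  have hlen : ((cs.drop j).take m).length = m := by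
    simp
    omega
  have hget : ∀ k (hk : k < m), ((cs.drop j).take m)[k]'(by rw [hlen]; exact hk) =
      cs.getD (j + k) ' ' := by
    intro k hk
    simp only [List.getElem_take, List.getElem_drop]
    rw [List.getD_eq_getElem cs ' ' (by omega)]
  have h0m : 0 < m := hm
  have h0 := hget 0 h0m
  have hr := hget (right - j) (by omega)
  have hrr : j + (right - j) = right := by omega
  rw [hrr] at hr
  have hmem0 : ((cs.drop j).take m)[0]'(by rw [hlen]; exact h0m) ∈ (cs.drop j).take m :=
    List.getElem_mem _
  have hmemr : ((cs.drop j).take m)[right - j]'(by rw [hlen]; omega) ∈ (cs.drop j).take m :=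
    List.getElem_mem _
  have e0 := hall _ hmem0
  have er := hall _ hmemr
  rw [h0] at e0
  rw [hr] at er
  have hj0 : cs.getD (j + 0) ' ' = c0 := hconst (j + 0) (by omega) (by omega)
  have hprev : cs.getD (right - 1) ' ' = c0 := hconst (right - 1) (by omega) (by omega)
  apply hne
  rw [er, ← e0, hj0, hprev]

-- B's fold over the positions of one run, from position j to e := min right (n-m+1)
theorem segAux (cs : List Char) (m left right : Nat) (hm : 1 ≤ m)
    (hlr : left < right) (hrn : right ≤ cs.length)
    (hconst : ∀ x, left ≤ x → x < right → cs.getD x ' ' = cs.getD left ' ')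
    (hstop : right = cs.length ∨ cs.getD right ' ' ≠ cs.getD (right - 1) ' ') :
    ∀ (k j : Nat) (d : PySem.Dict (List Char) Int), left ≤ j →
      (j : Int) ≤ min (right : Int) ((cs.length : Int) - m + 1) →
      (min (right : Int) ((cs.length : Int) - m + 1)).toNat - j ≤ k →
      (PySem.List.pyRange (j : Int) (min (right : Int) ((cs.length : Int) - m + 1)) 1).foldl
          (posStep cs (m : Int)) d =
        if (j : Int) + m ≤ (right : Int) then
          d.insert ((cs.drop left).take m)
            (d.getD ((cs.drop left).take m) 0 + ((right : Int) - m - j + 1))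
        else d := by
  intro k
  induction k with
  | zero =>
    intro j d hlj hje hk
    have hje' : (j : Int) = min (right : Int) ((cs.length : Int) - m + 1) := by omega
    rw [PySem.List.pyRange_one_eq_nil (by omega)]
    rw [if_neg (by omega)]
    rfl
  | succ k ih =>
    intro j d hlj hje hk
    by_cases hjlt : (j : Int) < min (right : Int) ((cs.length : Int) - m + 1)
    · rw [PySem.List.pyRange_one_cons hjlt, List.foldl_cons]
      have hjn : j + m ≤ cs.length := by omega
      have hjr : j < right := by omega
      have hps : posStep cs (m : Int) d (j : Int) =
          if (cs.drop j).take m ≠ [] ∧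
              ∀ ch ∈ (cs.drop j).take m, ch = ((cs.drop j).take m).headD ' '
          then d.insert ((cs.drop j).take m) (d.getD ((cs.drop j).take m) 0 + 1)
          else d := by
        unfold posStep
        rw [slice_window]
      by_cases hq : j + m ≤ right
      · -- uniform window, key = replicate m c = (cs.drop left).take m
        have hwin : (cs.drop j).take m = List.replicate m (cs.getD left ' ') :=
          window_eq_replicate cs m j _ hjn (fun x hx1 hx2 => hconst x (by omega) (by omega))
        have hkey : (cs.drop left).take m = List.replicate m (cs.getD left ' ') :=
          window_eq_replicate cs m left _ (by omega) (fun x hx1 hx2 => hconst x hx1 (by omega))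
        obtain ⟨m', rfl⟩ : ∃ m', m = m' + 1 := ⟨m - 1, by omega⟩
        have hcond : ((cs.drop j).take (m' + 1) ≠ [] ∧
            ∀ ch ∈ (cs.drop j).take (m' + 1), ch = ((cs.drop j).take (m' + 1)).headD ' ') := by
          rw [hwin]
          constructor
          · simp [List.replicate_succ]
          · intro ch hch
            rw [List.eq_of_mem_replicate hch]
            simp [List.replicate_succ]
        rw [hps, if_pos hcond]
        rw [hwin, ← hkey]
        have hcast : ((j : Int) + 1) = ((j + 1 : Nat) : Int) := by push_cast; ring
        rw [hcast, ih (j + 1) _ (by omega) (by omega) (by omega)]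
        by_cases hq1 : ((j + 1 : Nat) : Int) + ((m' + 1 : Nat) : Int) ≤ (right : Int)
        · rw [if_pos hq1, if_pos (by push_cast at hq1 ⊢; omega)]
          rw [PySem.Dict.getD_insert_self, PySem.Dict.insert_insert_self]
          congr 1
          push_cast
          ring
        · rw [if_neg hq1, if_pos (by push_cast; omega)]
          congr 1
          have hone : ((right : Int) - ((m' + 1 : Nat) : Int) - (j : Nat) + 1) = 1 := by
            push_cast at hq1 ⊢
            omega
          rw [hone]
      · -- window crosses the run boundary: not uniform
        have hrltn : right < cs.length := by omega
        have hne : cs.getD right ' ' ≠ cs.getD (right - 1) ' ' := by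
          rcases hstop with h | h
          · omega
          · exact h
        have hnc := window_not_uniform cs m j right _ hm hjr (by omega) hjn
          (fun x hx1 hx2 => hconst x (by omega) hx2) hne
        rw [hps, if_neg hnc]
        have hcast : ((j : Int) + 1) = ((j + 1 : Nat) : Int) := by push_cast; ring
        rw [hcast, ih (j + 1) d (by omega) (by omega) (by omega)]
        rw [if_neg (by push_cast; omega), if_neg (by omega)]
    · have hje' : (j : Int) = min (right : Int) ((cs.length : Int) - m + 1) := by omega
      rw [PySem.List.pyRange_one_eq_nil (by omega)]
      rw [if_neg (by omega)]
      rfl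

-- one whole run of B's fold equals A's single dict update
theorem segRun (cs : List Char) (m left right : Nat) (hm : 1 ≤ m)
    (hlr : left < right) (hrn : right ≤ cs.length)
    (hconst : ∀ x, left ≤ x → x < right → cs.getD x ' ' = cs.getD left ' ')
    (hstop : right = cs.length ∨ cs.getD right ' ' ≠ cs.getD (right - 1) ' ')
    (d : PySem.Dict (List Char) Int) :
    (PySem.List.pyRange (left : Int) ((cs.length : Int) - m + 1) 1).foldl (posStep cs (m : Int)) d =
      (PySem.List.pyRange (right : Int) ((cs.length : Int) - m + 1) 1).foldl (posStep cs (m : Int))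
        (if (m : Int) ≤ (right : Int) - (left : Int) then
          d.insert ((cs.drop left).take m)
            (d.getD ((cs.drop left).take m) 0 + max 0 ((right : Int) - (left : Int) - m + 1))
        else d) := by
  by_cases hle : (left : Int) ≤ (cs.length : Int) - m + 1
  · have hemin : (left : Int) ≤ min (right : Int) ((cs.length : Int) - m + 1) := by omega
    have hsplit : PySem.List.pyRange (left : Int) ((cs.length : Int) - m + 1) 1 =
        PySem.List.pyRange (left : Int) (min (right : Int) ((cs.length : Int) - m + 1)) 1 ++
        PySem.List.pyRange (min (right : Int) ((cs.length : Int) - m + 1)) ((cs.length : Int) - m + 1) 1 :=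
      PySem.List.pyRange_one_append _ _ _ hemin (by omega)
    rw [hsplit, List.foldl_append]
    rw [segAux cs m left right hm hlr hrn hconst hstop
      ((min (right : Int) ((cs.length : Int) - m + 1)).toNat - left) left d (le_refl _) hemin (le_refl _)]
    have htails : PySem.List.pyRange (min (right : Int) ((cs.length : Int) - m + 1)) ((cs.length : Int) - m + 1) 1 =
        PySem.List.pyRange (right : Int) ((cs.length : Int) - m + 1) 1 := by
      by_cases hrle : (right : Int) ≤ (cs.length : Int) - m + 1
      · rw [min_eq_left hrle]
      · rw [PySem.List.pyRange_one_eq_nil (by omega), PySem.List.pyRange_one_eq_nil (by omega)]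
    rw [htails]
    congr 1
    by_cases hq : (m : Int) ≤ (right : Int) - (left : Int)
    · rw [if_pos (by omega), if_pos hq]
      congr 1
      have : max 0 ((right : Int) - (left : Int) - m + 1) = (right : Int) - (left : Int) - m + 1 := by
        omega
      rw [this]
      ring
    · rw [if_neg (by omega), if_neg hq]
  · rw [PySem.List.pyRange_one_eq_nil (by omega), PySem.List.pyRange_one_eq_nil (by omega)]
    rw [if_neg (by omega)]

-- A's loop against B's fold over all remaining positions
theorem loopA_eq_fold (cs : List Char) (m : Nat) (hm : 1 ≤ m) :
    ∀ (k left : Nat) (d : PySem.Dict (List Char) Int), left ≤ cs.length →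
      cs.length - left ≤ k → d.keys.Nodup →
      d.values.any (fun v => decide (3 ≤ v)) = false →
      loopA cs (m : Int) cs.length left d =
        ((PySem.List.pyRange (left : Int) ((cs.length : Int) - m + 1) 1).foldl
          (posStep cs (m : Int)) d).values.any (fun v => decide (3 ≤ v)) := by
  intro k
  induction k with
  | zero =>
    intro left d hln hk hnd hfalse
    rw [loopA, dif_neg (by omega : ¬ left < cs.length)]
    rw [PySem.List.pyRange_one_eq_nil (by omega)]
    exact hfalse.symm
  | succ k ih =>
    intro left d hln hk hnd hfalse
    rw [loopA]
    by_cases hlt : left < cs.length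
    · rw [dif_pos hlt]
      set right := runEndA cs cs.length (left + 1) with hrdef
      have hr1 : left + 1 ≤ right := le_runEndA cs cs.length (left + 1)
      have hrn : right ≤ cs.length := runEndA_le_n cs cs.length (left + 1) (by omega)
      have hconst : ∀ x, left ≤ x → x < right → cs.getD x ' ' = cs.getD left ' ' :=
        run_const cs left right (fun j hj1 hj2 =>
          runEndA_chars cs cs.length (cs.length - (left + 1)) (left + 1) j (le_refl _)
            (by omega) hj2)
      have hstop : right = cs.length ∨ cs.getD right ' ' ≠ cs.getD (right - 1) ' ' := by
        have := runEndA_stop cs cs.length (cs.length - (left + 1)) (left + 1) (le_refl _)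
        rw [← hrdef] at this
        by_cases h : right = cs.length
        · exact Or.inl h
        · exact Or.inr (fun heq => this ⟨by omega, heq⟩)
      have hkeyeq : PySem.List.slice cs (some (left : Int)) (some ((left : Int) + (m : Int))) =
          (cs.drop left).take m := slice_window cs m left
      rw [segRun cs m left right hm (by omega) hrn hconst hstop d]
      by_cases hq : (m : Int) ≤ (right : Int) - (left : Int)
      · rw [if_pos hq]
        simp only [hkeyeq]
        rw [if_pos hq]
        set d' := d.insert ((cs.drop left).take m)
          (d.getD ((cs.drop left).take m) 0 + max 0 ((right : Int) - (left : Int) - m + 1)) with hd'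
        have hnd' : d'.keys.Nodup := PySem.Dict.nodup_keys_insert _ _ _ hnd
        by_cases h3 : maxGe3 d' = true
        · rw [if_pos h3]
          rw [maxGe3_eq_any] at h3
          exact (any_ge3_foldl_pos cs (m : Int) _ d' hnd' h3).symm
        · rw [if_neg h3]
          rw [maxGe3_eq_any] at h3
          exact ih right d' (by omega) (by omega) hnd' (Bool.not_eq_true _ ▸ h3 : _)
      · rw [if_neg hq, if_neg hq]
        exact ih right d (by omega) (by omega) hnd hfalse
    · rw [dif_neg hlt]
      rw [PySem.List.pyRange_one_eq_nil (by omega)]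
      exact hfalse.symm

-- ===== VERDICT (by name: the statement is the Claim_ definition above) =====
theorem check_spec : Claim_equal_check := by
  intro s mid _ hpre
  unfold Pre_check at hpre
  have hmid : 0 ≤ mid := le_trans (by norm_num) hpre
  obtain ⟨m, rfl⟩ : ∃ m : Nat, mid = (m : Nat) := ⟨mid.toNat, (Int.toNat_of_nonneg hmid).symm⟩
  have hm : 1 ≤ m := by exact_mod_cast hpre
  unfold Spec_check check check_alt
  have h0 : ((0 : Nat) : Int) = 0 := rfl
  rw [← h0]
  exact loopA_eq_fold s.toList m hm s.toList.length 0 PySem.Dict.empty (by omega) (le_refl _)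
    PySem.Dict.nodup_keys_empty rfl
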